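-- pv_equiv track=rewrite | github.com/kitessafikadu/competitive-programming | 07-Oct-2025/Partition String  400559.py | partitionString
-- ===== SOURCE A (Python) =====
-- def partitionString(s: str) -> list[str]:
--     result = []
--     seen = set()
--     current = ""
--
--     for ch in s:
--         current += ch
--         if current not in seen:
--             result.append(current)
--             seen.add(current)
--             current=""
--
--     return result
-- ===== SOURCE B (Python) =====
-- def partitionString(s: str) -> list[str]:
--     result = []
--     seen = set()
--     rest = s
--     while rest:
--         k = 1
--         while k <= len(rest) and rest[:k] in seen:
--             k += 1
--         if k > len(rest):
--             break
--         result.append(rest[:k])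
--         seen.add(rest[:k])
--         rest = rest[k:]
--     return result
-- ===== Notes on version B (the rewrite author's own statement) =====
-- stated objective: alternative
-- what changed: Replaces A's single char-by-char fold with an accumulator string by a two-level loop over suffixes: an inner scan finds the length k of the shortest unseen prefix of the remaining suffix, which is then sliced off in one step.
import Mathlib
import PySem

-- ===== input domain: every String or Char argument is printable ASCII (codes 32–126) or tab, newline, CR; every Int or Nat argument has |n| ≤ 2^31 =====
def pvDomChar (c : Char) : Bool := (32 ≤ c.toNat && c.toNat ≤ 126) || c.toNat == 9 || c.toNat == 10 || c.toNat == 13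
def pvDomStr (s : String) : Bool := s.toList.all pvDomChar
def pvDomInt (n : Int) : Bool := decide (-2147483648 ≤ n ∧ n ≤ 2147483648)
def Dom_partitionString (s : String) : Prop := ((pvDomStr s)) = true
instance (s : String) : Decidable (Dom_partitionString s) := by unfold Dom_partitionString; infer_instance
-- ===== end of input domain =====

-- B replaces A's char-by-char fold with an accumulator string by a two-level loop over
-- suffixes (inner scan finds the shortest unseen prefix length, which is sliced off at once);
-- same cost, alternative structure.


-- ===== PORT A =====
-- one iteration of A's 'for ch in s' loop, state = (result, seen, current)
def pvStepA (st : List String × PySem.Set String × String) (ch : Char) :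
    List String × PySem.Set String × String :=
  let current := st.2.2.push ch
  if PySem.Set.contains st.2.1 current then
    (st.1, st.2.1, current)
  else
    (st.1 ++ [current], PySem.Set.add st.2.1 current, "")

def partitionString (s : String) : List String :=
  (s.toList.foldl pvStepA ([], PySem.Set.empty, "")).1

-- ===== PORT B =====
-- inner 'while k <= len(rest) and rest[:k] in seen: k += 1'
def pvFindK (rest : List Char) (seen : PySem.Set String) (k : Nat) : Nat :=
  if k ≤ rest.length ∧ PySem.Set.contains seen (String.ofList (rest.take k)) then
    pvFindK rest seen (k + 1)
  else k
termination_by rest.length + 1 - k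

-- termination helper for pvGo (cited in its decreasing_by)
theorem pvFindK_ge (rest : List Char) (seen : PySem.Set String) (k : Nat) :
    k ≤ pvFindK rest seen k := by
  fun_induction pvFindK rest seen k with
  | case1 k h ih => omega
  | case2 k h => omega

-- outer 'while rest' loop of B
def pvGo (rest : List Char) (seen : PySem.Set String) (res : List String) : List String :=
  if hr : rest = [] then res
  else
    let k := pvFindK rest seen 1
    if hk : rest.length < k then res
    else
      pvGo (rest.drop k) (PySem.Set.add seen (String.ofList (rest.take k)))
        (res ++ [String.ofList (rest.take k)])
termination_by rest.length
decreasing_by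
  have h1 : 1 ≤ pvFindK rest seen 1 := pvFindK_ge rest seen 1
  have h0 : rest.length ≠ 0 := by simpa using List.length_eq_zero_iff.not.mpr hr
  simp only [List.length_drop]; omega

def partitionString_alt (s : String) : List String :=
  pvGo s.toList PySem.Set.empty []

-- ===== PRECONDITION & SPEC =====
def Spec_partitionString (s : String) (out : List String) : Prop := out = partitionString_alt s
instance (s : String) (out : List String) : Decidable (Spec_partitionString s out) := by unfold Spec_partitionString; infer_instance

-- ===== CLAIM (what is proved, stated in full; the proofs are below) =====
def Claim_equal_partitionString : Prop := ∀ (s : String), Dom_partitionString s → Spec_partitionString s (partitionString s)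

-- ===== LEMMAS AND PROOFS =====

-- proof-side view of what A's fold does until it emits its next segment
def pvScan (cur rest : List Char) (seen : PySem.Set String) : Option (String × List Char) :=
  match rest with
  | [] => none
  | ch :: t =>
    if PySem.Set.contains seen (String.ofList (cur ++ [ch])) then pvScan (cur ++ [ch]) t seen
    else some (String.ofList (cur ++ [ch]), t)

theorem pvPush_ofList (cur : List Char) (ch : Char) :
    (String.ofList cur).push ch = String.ofList (cur ++ [ch]) := by
  apply String.toList_injective; simp

-- A's fold, from an arbitrary accumulated 'current', factored through pvScan
theorem pvFoldA_scan (rest : List Char) : ∀ (cur : List Char) (res : List String)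
    (seen : PySem.Set String),
    List.foldl pvStepA (res, seen, String.ofList cur) rest =
      match pvScan cur rest seen with
      | none => (res, seen, String.ofList (cur ++ rest))
      | some (p, t) =>
          List.foldl pvStepA (res ++ [p], PySem.Set.add seen p, String.ofList []) t := by
  induction rest with
  | nil => intro cur res seen; simp [pvScan]
  | cons ch t ih =>
    intro cur res seen
    simp only [List.foldl_cons, pvStepA, pvPush_ofList, pvScan]
    by_cases h : PySem.Set.contains seen (String.ofList (cur ++ [ch])) = true
    · rw [if_pos h, if_pos h, ih (cur ++ [ch]) res seen]
      simp
    · rw [if_neg h, if_neg h]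

-- pvScan over a suffix of 'full' computes pvFindK's answer
theorem pvScan_findK (full : List Char) (seen : PySem.Set String) : ∀ (j : Nat),
    pvScan (full.take j) (full.drop j) seen =
      (if full.length < pvFindK full seen (j + 1) then none
       else some (String.ofList (full.take (pvFindK full seen (j + 1))),
                  full.drop (pvFindK full seen (j + 1)))) := by
  intro j
  induction hn : full.length - j using Nat.strong_induction_on generalizing j with
  | _ n ih =>
  by_cases hj : j < full.length
  · have hdrop : full.drop j = full[j] :: full.drop (j + 1) := List.drop_eq_getElem_cons hj
    have htake : full.take j ++ [full[j]] = full.take (j + 1) := by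
      rw [List.take_add_one, List.getElem?_eq_getElem hj]; rfl
    rw [hdrop]
    simp only [pvScan, htake]
    by_cases h : PySem.Set.contains seen (String.ofList (full.take (j + 1))) = true
    · rw [if_pos h]
      have hrec : pvFindK full seen (j + 1) = pvFindK full seen (j + 2) := by
        rw [pvFindK, if_pos ⟨Nat.succ_le_of_lt hj, h⟩]
      rw [ih (full.length - (j + 1)) (by omega) (j + 1) rfl, hrec]
    · rw [if_neg h]
      have hstop : pvFindK full seen (j + 1) = j + 1 := by
        rw [pvFindK, if_neg (by rintro ⟨-, hc⟩; exact h hc)]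
      rw [hstop, if_neg (by omega)]
  · have hdrop : full.drop j = [] := List.drop_eq_nil_of_le (by omega)
    have hstop : pvFindK full seen (j + 1) = j + 1 := by
      rw [pvFindK, if_neg (by rintro ⟨hle, -⟩; omega)]
    rw [hdrop, hstop, if_pos (by omega)]
    simp [pvScan]

-- main bridge: A's fold from a fresh segment equals B's outer loop
theorem pvFoldA_go (rest0 : List Char) (seen0 : PySem.Set String) (res0 : List String) :
    (List.foldl pvStepA (res0, seen0, String.ofList []) rest0).1 = pvGo rest0 seen0 res0 := by
  fun_induction pvGo rest0 seen0 res0 with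
  | case1 seen res =>
    simp
  | case2 rest seen res hr k hk =>
    have hk' : rest.length < pvFindK rest seen 1 := hk
    rw [pvFoldA_scan rest [] res seen]
    have h0 : pvScan ([] : List Char) rest seen =
        pvScan (rest.take 0) (rest.drop 0) seen := by simp
    rw [h0, pvScan_findK rest seen 0, if_pos hk']
  | case3 rest seen res hr k hk ih =>
    have hk' : ¬ rest.length < pvFindK rest seen 1 := hk
    rw [pvFoldA_scan rest [] res seen]
    have h0 : pvScan ([] : List Char) rest seen =
        pvScan (rest.take 0) (rest.drop 0) seen := by simp
    rw [h0, pvScan_findK rest seen 0, if_neg hk']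
    simpa using ih

-- ===== VERDICT (by name: the statement is the Claim_ definition above) =====
theorem partitionString_spec : Claim_equal_partitionString := by
  intro s _
  show partitionString s = partitionString_alt s
  unfold partitionString partitionString_alt
  have h : ("" : String) = String.ofList [] := rfl
  rw [h, pvFoldA_go]
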